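-- pv_equiv track=rewrite | github.com/HericPan/ICS33-Records | q1helper/q1solution.py | by_skill
-- ===== SOURCE A (Python) =====
-- def by_skill(db1 : {str:{str:int}}) -> [int,[str,[str]]]:
--     records = list
--     outerdict = dict()
--     for chosen_level in range(5, 0, -1):
--         outerdict[chosen_level] = dict()
--         innerdict = outerdict[chosen_level]
--
--         # now iterate through db to get each skill_name and add qualified people into the list
--         for name,skill_set in db1.items():
--             for skill_name, skill_level in skill_set.items():
--                 if skill_level == chosen_level:
--                     if skill_name not in innerdict:
--                         innerdict[skill_name] = []
--                     innerdict[skill_name].append(name)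
--         if len(innerdict) == 0:
--             outerdict.pop(chosen_level)
--     record = sorted([(level, sorted([(skill_name, sorted(name)) for skill_name,name in skills.items()], key=(lambda t:t[0]))) for level, skills in outerdict.items()], key=(lambda t: -t[0]))
--     return record
-- ===== SOURCE B (Python) =====
-- def by_skill(db1 : {str:{str:int}}) -> [int,[str,[str]]]:
--     triples = [(lvl, sk, nm) for nm, ss in db1.items() for sk, lvl in ss.items()]
--     names = {}
--     for lvl, sk, nm in triples:
--         names.setdefault((lvl, sk), []).append(nm)
--     levels = sorted({l for l, _, _ in triples if 1 <= l <= 5}, key=lambda l: -l)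
--     return [(l, [(s, sorted(names[l, s]))
--                  for s in sorted({s for l2, s, _ in triples if l2 == l})])
--             for l in levels]
-- ===== Notes on version B (the rewrite author's own statement) =====
-- stated objective: alternative
-- what changed: Replaces A's five nested-dict re-scans of the database (one pass per level 5..1, appending names under guarded dict insertion) by a dict-light pipeline: flatten the database once into (level, skill, name) triples, group the names once in a flat (level, skill)-keyed dict, and build the result with set comprehensions over the triples plus the same sorts.
import Mathlib
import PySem

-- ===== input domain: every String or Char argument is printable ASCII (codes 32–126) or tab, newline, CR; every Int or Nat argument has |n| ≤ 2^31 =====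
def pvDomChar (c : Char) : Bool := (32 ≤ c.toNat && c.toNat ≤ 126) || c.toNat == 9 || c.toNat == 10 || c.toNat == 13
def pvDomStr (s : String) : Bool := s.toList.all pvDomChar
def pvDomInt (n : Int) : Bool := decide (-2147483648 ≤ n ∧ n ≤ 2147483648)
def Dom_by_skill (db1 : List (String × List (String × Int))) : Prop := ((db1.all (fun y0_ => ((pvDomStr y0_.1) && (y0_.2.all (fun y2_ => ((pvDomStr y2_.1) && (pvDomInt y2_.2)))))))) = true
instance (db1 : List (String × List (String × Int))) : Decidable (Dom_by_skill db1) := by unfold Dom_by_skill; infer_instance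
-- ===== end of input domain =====

-- B replaces A's five nested-dict re-scans of the database (one per level 5..1) by a dict-free pipeline over a flattened triples list; the return values are proved equal on all inputs.

-- ===== PORT A =====
def by_skill (db1 : List (String × List (String × Int))) : List (Int × (List (String × List String))) :=
  let outerdict : PySem.Dict Int (PySem.Dict String (List String)) :=
    (PySem.List.pyRange 5 0 (-1)).foldl
      (fun outerdict chosen =>
        let innerdict : PySem.Dict String (List String) :=
          db1.foldl
            (fun innerdict p =>
              p.2.foldl
                (fun innerdict q =>
                  if q.2 == chosen then
                    let innerdict := if innerdict.contains q.1 then innerdict else innerdict.insert q.1 []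
                    innerdict.modify q.1 [] (fun l => l ++ [p.1])
                  else innerdict)
                innerdict)
            PySem.Dict.empty
        let outerdict := outerdict.insert chosen innerdict
        if innerdict.size == 0 then outerdict.erase chosen else outerdict)
      PySem.Dict.empty
  PySem.List.sorted
    (outerdict.items.map (fun lp =>
      (lp.1, PySem.List.sorted (lp.2.items.map (fun sp => (sp.1, PySem.List.sorted sp.2 (fun x => x)))) (fun t => t.1))))
    (fun t => -t.1)

-- ===== PORT B =====
-- names[l, s] is looked up only at keys the dict was just built with, so Python's [] never raises;
-- it is ported as get? with .getD [] on the impossible none branch.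
def by_skill_alt (db1 : List (String × List (String × Int))) : List (Int × (List (String × List String))) :=
  let triples : List (Int × String × String) := db1.flatMap (fun p => p.2.map (fun q => (q.2, q.1, p.1)))
  let names : PySem.Dict (Int × String) (List String) :=
    triples.foldl (fun d t => d.modify (t.1, t.2.1) [] (fun v => v ++ [t.2.2])) PySem.Dict.empty
  let levels : List Int :=
    PySem.List.sorted (PySem.Set.ofList ((triples.filter (fun t => decide (1 ≤ t.1 ∧ t.1 ≤ 5))).map (fun t => t.1))) (fun l => -l)
  levels.map (fun l =>
    (l, (PySem.List.sorted (PySem.Set.ofList ((triples.filter (fun t => t.1 == l)).map (fun t => t.2.1))) (fun s => s)).map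
        (fun s => (s, PySem.List.sorted ((names.get? (l, s)).getD []) (fun x => x)))))

-- ===== PRECONDITION & SPEC =====
def Spec_by_skill (db1 : List (String × List (String × Int))) (out : List (Int × (List (String × List String)))) : Prop := out = by_skill_alt db1
instance (db1 : List (String × List (String × Int))) (out : List (Int × (List (String × List String)))) : Decidable (Spec_by_skill db1 out) := by unfold Spec_by_skill; infer_instance

-- ===== CLAIM (what is proved, stated in full; the proofs are below) =====
def Claim_equal_by_skill : Prop := ∀ (db1 : List (String × List (String × Int))), Dom_by_skill db1 → Spec_by_skill db1 (by_skill db1)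

-- ===== LEMMAS AND PROOFS =====

-- A's inner-loop step for a chosen level, and the inner dict A builds for that level
def pvAStep (chosen : Int) (name : String) (innerdict : PySem.Dict String (List String)) (q : String × Int) : PySem.Dict String (List String) :=
  if q.2 == chosen then
    let innerdict := if innerdict.contains q.1 then innerdict else innerdict.insert q.1 []
    innerdict.modify q.1 [] (fun l => l ++ [name])
  else innerdict

def pvAInner (db1 : List (String × List (String × Int))) (chosen : Int) : PySem.Dict String (List String) :=
  db1.foldl (fun innerdict p => p.2.foldl (pvAStep chosen p.1) innerdict) PySem.Dict.empty

def pvAOuterStep (db1 : List (String × List (String × Int))) (outerdict : PySem.Dict Int (PySem.Dict String (List String))) (chosen : Int) : PySem.Dict Int (PySem.Dict String (List String)) :=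
  let innerdict := pvAInner db1 chosen
  let outerdict := outerdict.insert chosen innerdict
  if innerdict.size == 0 then outerdict.erase chosen else outerdict

-- B's flattened triples and the per-level (skill, name) pairs
def pvT (db1 : List (String × List (String × Int))) : List (Int × String × String) :=
  db1.flatMap (fun p => p.2.map (fun q => (q.2, q.1, p.1)))

def pvPairs (db1 : List (String × List (String × Int))) (l : Int) : List (String × String) :=
  ((pvT db1).filter (fun t => t.1 == l)).map (fun t => t.2)

-- B's flat pair-keyed names dict
def pvNames (db1 : List (String × List (String × Int))) : PySem.Dict (Int × String) (List String) :=
  (pvT db1).foldl (fun d t => d.modify (t.1, t.2.1) [] (fun v => v ++ [t.2.2])) PySem.Dict.empty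

-- shared output shaping on the A side
def pvG (lp : Int × PySem.Dict String (List String)) : Int × List (String × List String) :=
  (lp.1, PySem.List.sorted (lp.2.items.map (fun sp => (sp.1, PySem.List.sorted sp.2 (fun x => x)))) (fun t => t.1))

-- the surviving levels, in A's scan order
def pvLs (db1 : List (String × List (String × Int))) : List Int :=
  [(5:Int), 4, 3, 2, 1].filter (fun l => decide ((pvAInner db1 l).items ≠ []))

lemma by_skill_eq (db1 : List (String × List (String × Int))) :
    by_skill db1 = PySem.List.sorted ((List.foldl (pvAOuterStep db1) PySem.Dict.empty [5,4,3,2,1]).items.map pvG) (fun t => -t.1) := by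
  unfold by_skill pvAOuterStep pvAInner pvAStep pvG
  rw [show PySem.List.pyRange 5 0 (-1) = [(5:Int),4,3,2,1] from by decide]

lemma pv_hany {κ ν : Type} [BEq κ] (d : PySem.Dict κ ν) (k : κ)
    (h : d.contains k = false) : (d.items.any fun p => p.1 == k) = false := by
  unfold PySem.Dict.contains at h; exact h

lemma insert_insert_cancel {κ ν : Type} [BEq κ] [LawfulBEq κ] (d : PySem.Dict κ ν) (k : κ) (v w : ν)
    (h : d.contains k = false) : (d.insert k v).insert k w = d.insert k w := by
  have hany := pv_hany d k h
  have hall : ∀ p ∈ d.items, (p.1 == k) = false := by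
    rw [List.any_eq_false] at hany; intro p hp; simpa using hany p hp
  unfold PySem.Dict.insert PySem.Dict.contains
  simp only [hany, Bool.false_eq_true, ite_false]
  have h2 : ((d.items ++ [(k, v)]).any fun p => p.1 == k) = true := by simp
  simp only [h2, if_true, List.map_append]
  have hmap : List.map (fun p => if (p.1 == k) = true then (k, w) else p) d.items = List.map id d.items :=
    List.map_congr_left (fun p hp => by simp [hall p hp])
  simp [hmap]

lemma erase_insert_cancel {κ ν : Type} [BEq κ] [LawfulBEq κ] (d : PySem.Dict κ ν) (k : κ) (v : ν)
    (h : d.contains k = false) : (d.insert k v).erase k = d := by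
  have hany := pv_hany d k h
  have hall : ∀ p ∈ d.items, (p.1 == k) = false := by
    rw [List.any_eq_false] at hany; intro p hp; simpa using hany p hp
  unfold PySem.Dict.insert PySem.Dict.erase PySem.Dict.contains
  simp only [hany, Bool.false_eq_true, ite_false, List.filter_append]
  have : List.filter (fun p => !p.1 == k) d.items = d.items := by
    rw [List.filter_eq_self]; intro p hp; simp [hall p hp]
  simp [this]

-- A's guarded append equals an unconditional modify
lemma pvAddName_eq (inner : PySem.Dict String (List String)) (skill name : String) :
    (if inner.contains skill then inner else inner.insert skill []).modify skill [] (fun l => l ++ [name])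
      = inner.modify skill [] (fun l => l ++ [name]) := by
  by_cases h : inner.contains skill
  · simp [h]
  · rw [Bool.not_eq_true] at h
    simp only [h, Bool.false_eq_true, ite_false]
    unfold PySem.Dict.modify
    rw [PySem.Dict.getD_insert_self]
    have hget : inner.getD skill [] = [] := by
      unfold PySem.Dict.getD
      rw [(PySem.Dict.get?_eq_none_iff_contains inner skill).2 h]
      rfl
    rw [hget, insert_insert_cancel _ _ _ _ h]

lemma pvAStep_eq (l : Int) (name : String) (d : PySem.Dict String (List String)) (q : String × Int) :
    pvAStep l name d q = if q.2 == l then d.modify q.1 [] (fun v => v ++ [name]) else d := by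
  unfold pvAStep
  split
  · exact pvAddName_eq d q.1 name
  · rfl

lemma pvFoldl_flatMap {α β γ : Type} (l : List α) (f : α → List β) (g : γ → β → γ) (i : γ) :
    (l.flatMap f).foldl g i = l.foldl (fun a x => (f x).foldl g a) i := by
  induction l generalizing i with
  | nil => rfl
  | cons x xs ih => simp only [List.flatMap_cons, List.foldl_append, List.foldl_cons]; exact ih _

-- A's inner dict for level l IS the grouping fold over the flattened per-level (skill, name) pairs
lemma inner_as_fold (db1 : List (String × List (String × Int))) (l : Int) :
    pvAInner db1 l = (pvPairs db1 l).foldl (fun d p => d.modify p.1 [] (fun v => v ++ [p.2])) PySem.Dict.empty := by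
  unfold pvAInner pvPairs pvT
  rw [List.foldl_map, ← PySem.List.foldl_if_eq_foldl_filter, pvFoldl_flatMap]
  apply PySem.List.foldl_congr_mem
  intro d p _
  rw [List.foldl_map]
  apply PySem.List.foldl_congr_mem
  intro d' q _
  exact pvAStep_eq l p.1 d' q

-- the computed items of A's outer dict
lemma pvAFold_items (db1 : List (String × List (String × Int))) :
    ∀ (ls : List Int) (o : PySem.Dict Int (PySem.Dict String (List String))), ls.Nodup → (∀ l ∈ ls, o.contains l = false) →
    (ls.foldl (pvAOuterStep db1) o).items
      = o.items ++ (ls.filter (fun l => decide ((pvAInner db1 l).items ≠ []))).map (fun l => (l, pvAInner db1 l)) := by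
  intro ls
  induction ls with
  | nil => intro o _ _; simp
  | cons l ls ih =>
    intro o hnd hco
    simp only [List.foldl_cons, List.filter_cons]
    have hcl : o.contains l = false := hco l (by simp)
    by_cases hi : (pvAInner db1 l).items = []
    · have hsz : ((pvAInner db1 l).size == 0) = true := by
        simp [PySem.Dict.size, hi]
      have hstep : pvAOuterStep db1 o l = o := by
        unfold pvAOuterStep
        simp only [hsz, if_true]
        exact erase_insert_cancel o l _ hcl
      rw [hstep]
      have hd : (decide ((pvAInner db1 l).items ≠ [])) = false := by simp [hi]
      rw [hd]
      simp only [Bool.false_eq_true, if_false]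
      exact ih o hnd.of_cons (fun l' hl' => hco l' (by simp [hl']))
    · have hsz : ((pvAInner db1 l).size == 0) = false := by
        simp [PySem.Dict.size, List.length_eq_zero_iff, hi]
      have hstep : pvAOuterStep db1 o l = o.insert l (pvAInner db1 l) := by
        unfold pvAOuterStep
        simp only [hsz, Bool.false_eq_true, ite_false]
      rw [hstep]
      have hd : (decide ((pvAInner db1 l).items ≠ [])) = true := by simp [hi]
      rw [hd]
      simp only [if_true]
      have hco' : ∀ l' ∈ ls, (o.insert l (pvAInner db1 l)).contains l' = false := by
        intro l' hl'
        rw [PySem.Dict.contains_insert]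
        have hne : l' ≠ l := fun he => (List.nodup_cons.1 hnd).1 (he ▸ hl')
        simp [hne, hco l' (by simp [hl'])]
      rw [ih _ hnd.of_cons hco', PySem.Dict.items_insert_of_not_contains o _ hcl]
      simp

-- A's result as a map over the surviving levels in descending order
lemma pvLs_pairwise (db1 : List (String × List (String × Int))) : (pvLs db1).Pairwise (fun a b => b < a) := by
  refine List.Pairwise.filter _ ?_
  decide

lemma by_skill_as_map (db1 : List (String × List (String × Int))) :
    by_skill db1 = (pvLs db1).map (fun l => pvG (l, pvAInner db1 l)) := by
  rw [by_skill_eq]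
  have hA := pvAFold_items db1 [5,4,3,2,1] PySem.Dict.empty (by decide)
    (fun l _ => PySem.Dict.contains_empty l)
  rw [show (PySem.Dict.empty : PySem.Dict Int (PySem.Dict String (List String))).items = [] from rfl, List.nil_append] at hA
  rw [hA, List.map_map]
  refine PySem.List.sorted_eq_of_perm_of_pairwise_lt _ _ _ (List.Perm.refl _) ?_
  refine List.Pairwise.map _ ?_ (pvLs_pairwise db1)
  intro a b hba
  show -(pvG (a, pvAInner db1 a)).1 < -(pvG (b, pvAInner db1 b)).1
  unfold pvG
  omega

lemma inner_keys (db1 : List (String × List (String × Int))) (l : Int) :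
    (pvAInner db1 l).keys = PySem.Set.ofList ((pvPairs db1 l).map (fun p => p.1)) := by
  rw [inner_as_fold]
  rw [PySem.Dict.keys_foldl_modify_key (pvPairs db1 l) (fun p => p.1) [] (fun _ p => fun v => v ++ [p.2]) PySem.Dict.empty]
  rw [PySem.Set.ofList_eq_foldl]
  rfl

lemma inner_keys_nodup (db1 : List (String × List (String × Int))) (l : Int) :
    (pvAInner db1 l).keys.Nodup := by
  rw [inner_keys]; exact PySem.Set.nodup_ofList _

lemma inner_getD (db1 : List (String × List (String × Int))) (l : Int) (s : String) :
    (pvAInner db1 l).getD s [] = ((pvPairs db1 l).filter (fun p => p.1 == s)).map (fun p => p.2) := by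
  rw [inner_as_fold, PySem.Dict.getD_foldl_modify_append]
  rfl

lemma inner_items (db1 : List (String × List (String × Int))) (l : Int) :
    (pvAInner db1 l).items
      = (PySem.Set.ofList ((pvPairs db1 l).map (fun p => p.1))).map
          (fun s => (s, ((pvPairs db1 l).filter (fun p => p.1 == s)).map (fun p => p.2))) := by
  rw [PySem.Dict.items_eq_map_keys _ (inner_keys_nodup db1 l) [], inner_keys]
  exact List.map_congr_left (fun s _ => by rw [inner_getD])

lemma pvNames_getD (db1 : List (String × List (String × Int))) (k : Int × String) :
    (pvNames db1).getD k [] = ((pvT db1).filter (fun t => ((t.1, t.2.1) : Int × String) == k)).map (fun t => t.2.2) := by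
  unfold pvNames
  have h := PySem.Dict.getD_foldl_modify_append ((pvT db1).map (fun t => ((t.1, t.2.1), t.2.2))) PySem.Dict.empty k
  rw [List.foldl_map] at h
  rw [h, PySem.Dict.getD_empty, List.nil_append, List.filter_map, List.map_map]
  rfl

-- per-level: A's shaped inner dict equals B's comprehension value
lemma level_value_eq (db1 : List (String × List (String × Int))) (l : Int) :
    pvG (l, pvAInner db1 l)
      = (l, (PySem.List.sorted (PySem.Set.ofList (((pvT db1).filter (fun t => t.1 == l)).map (fun t => t.2.1))) (fun s => s)).map
          (fun s => (s, PySem.List.sorted (((pvNames db1).get? (l, s)).getD []) (fun x => x)))) := by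
  unfold pvG
  refine congrArg (Prod.mk l) ?_
  have hS : ((pvT db1).filter (fun t => t.1 == l)).map (fun t => t.2.1)
      = (pvPairs db1 l).map (fun p => p.1) := by
    unfold pvPairs; rw [List.map_map]; rfl
  have hN : ∀ s : String, ((pvNames db1).get? (l, s)).getD []
      = ((pvPairs db1 l).filter (fun p => p.1 == s)).map (fun p => p.2) := by
    intro s
    rw [← PySem.Dict.getD_eq_get?_getD, pvNames_getD db1 (l, s)]
    unfold pvPairs
    rw [List.filter_map, List.map_map, List.filter_filter]
    exact congrArg _ (List.filter_congr (fun t _ => by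
      show (t.1 == l && t.2.1 == s) = (t.2.1 == s && t.1 == l)
      exact Bool.and_comm _ _))
  rw [hS, inner_items, List.map_map]
  have hsorted : PySem.List.sorted
      ((PySem.Set.ofList ((pvPairs db1 l).map (fun p => p.1))).map
        ((fun sp : String × List String => (sp.1, PySem.List.sorted sp.2 (fun x => x))) ∘
          (fun s => (s, ((pvPairs db1 l).filter (fun p => p.1 == s)).map (fun p => p.2)))))
      (fun t => t.1)
      = (PySem.List.sorted (PySem.Set.ofList ((pvPairs db1 l).map (fun p => p.1))) (fun s => s)).map
          ((fun sp : String × List String => (sp.1, PySem.List.sorted sp.2 (fun x => x))) ∘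
            (fun s => (s, ((pvPairs db1 l).filter (fun p => p.1 == s)).map (fun p => p.2)))) := by
    refine PySem.List.sorted_eq_of_perm_of_pairwise_lt _ _ _ ?_ ?_
    · exact (PySem.List.sorted_perm _ _ _).map _
    · refine List.Pairwise.map _ ?_ (PySem.List.sorted_ofList_pairwise_lt ((pvPairs db1 l).map (fun p => p.1)))
      intro a b hab
      exact hab
  rw [hsorted]
  refine List.map_congr_left (fun s _ => ?_)
  simp only [Function.comp]
  rw [hN s]

-- B's level list equals A's surviving levels
lemma inner_items_ne_nil_iff (db1 : List (String × List (String × Int))) (l : Int) :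
    (pvAInner db1 l).items ≠ [] ↔ ∃ t ∈ pvT db1, t.1 = l := by
  rw [inner_items]
  rw [ne_eq, List.map_eq_nil_iff]
  constructor
  · intro h
    obtain ⟨a, ha⟩ := List.exists_mem_of_ne_nil _ h
    rw [PySem.Set.mem_ofList] at ha
    obtain ⟨p, hp, _⟩ := List.mem_map.1 ha
    obtain ⟨t, ht, rfl⟩ := List.mem_map.1 (by unfold pvPairs at hp; exact hp)
    exact ⟨t, (List.mem_filter.1 ht).1, by simpa using (List.mem_filter.1 ht).2⟩
  · rintro ⟨t, ht, rfl⟩ hnil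
    have : t.2.1 ∈ PySem.Set.ofList ((pvPairs db1 t.1).map (fun p => p.1)) := by
      rw [PySem.Set.mem_ofList]
      refine List.mem_map.2 ⟨t.2, ?_, rfl⟩
      unfold pvPairs
      exact List.mem_map.2 ⟨t, List.mem_filter.2 ⟨ht, by simp⟩, rfl⟩
    rw [hnil] at this
    exact (List.not_mem_nil).elim this

-- B's level list equals A's surviving levels
lemma levels_eq (db1 : List (String × List (String × Int))) :
    PySem.List.sorted (PySem.Set.ofList (((pvT db1).filter (fun t => decide (1 ≤ t.1 ∧ t.1 ≤ 5))).map (fun t => t.1))) (fun l => -l)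
      = pvLs db1 := by
  refine PySem.List.sorted_eq_of_perm_of_pairwise_lt _ _ _ ?_ ?_
  · have hnd1 : (pvLs db1).Nodup := (pvLs_pairwise db1).imp (fun h => (ne_of_gt h))
    refine (List.perm_ext_iff_of_nodup hnd1 (PySem.Set.nodup_ofList _)).2 ?_
    intro l
    rw [PySem.Set.mem_ofList]
    unfold pvLs
    rw [List.mem_filter, List.mem_map]
    constructor
    · rintro ⟨hml, hne⟩
      rw [decide_eq_true_iff] at hne
      obtain ⟨t, ht, rfl⟩ := (inner_items_ne_nil_iff db1 l).1 hne
      refine ⟨t, List.mem_filter.2 ⟨ht, ?_⟩, rfl⟩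
      have : (1 : Int) ≤ t.1 ∧ t.1 ≤ 5 := by
        simp only [List.mem_cons, List.not_mem_nil, or_false] at hml
        rcases hml with h|h|h|h|h <;> omega
      exact decide_eq_true this
    · rintro ⟨t, ht, rfl⟩
      have h15 := (List.mem_filter.1 ht).1
      have hrange : (1 : Int) ≤ t.1 ∧ t.1 ≤ 5 := by
        have := (List.mem_filter.1 ht).2
        exact of_decide_eq_true this
      refine ⟨?_, decide_eq_true ((inner_items_ne_nil_iff db1 t.1).2 ⟨t, h15, rfl⟩)⟩
      simp only [List.mem_cons, List.not_mem_nil, or_false]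
      omega
  · refine (pvLs_pairwise db1).imp ?_
    intro a b hba
    omega

-- ===== VERDICT (by name: the statement is the Claim_ definition above) =====
lemma by_skill_alt_eq (db1 : List (String × List (String × Int))) :
    by_skill_alt db1
      = (PySem.List.sorted (PySem.Set.ofList (((pvT db1).filter (fun t => decide (1 ≤ t.1 ∧ t.1 ≤ 5))).map (fun t => t.1))) (fun l => -l)).map
          (fun l => (l, (PySem.List.sorted (PySem.Set.ofList (((pvT db1).filter (fun t => t.1 == l)).map (fun t => t.2.1))) (fun s => s)).map
            (fun s => (s, PySem.List.sorted (((pvNames db1).get? (l, s)).getD []) (fun x => x))))) := rfl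

theorem by_skill_spec : Claim_equal_by_skill := by
  intro db1 _
  unfold Spec_by_skill
  rw [by_skill_as_map, by_skill_alt_eq, levels_eq]
  exact List.map_congr_left (fun l _ => level_value_eq db1 l)
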